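-- pv_equiv track=rewrite | github.com/ossf/fuzz-introspector | tools/auto-fuzz/fuzz_driver_generation_jvm.py | _should_filter_method
-- ===== SOURCE A (Python) =====
-- def _should_filter_method(callsites, target_method, current_method, handled):
--     """
--     Search recursively if the target_method has
--     been called by any methods except for themself.
--     If yes, that method should be filtered.
--     """
--     result = True
--     if current_method in callsites:
--         callers = callsites[current_method]
--         for caller in callers:
--             if caller == target_method:
--                 result = False
--                 continue
--             if caller not in callsites:
--                 return True
--             if caller not in handled:
--                 if caller in callsites:
--                     handled.append(caller)
--                     inner_result = _should_filter_method(
--                         callsites, target_method, caller, handled)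
--                     if inner_result:
--                         return True
--                     result = False
--     else:
--         return False
--
--     return result
-- ===== SOURCE B (Python) =====
-- def _should_filter_method(callsites, target_method, current_method, handled):
--     """
--     Iterative DFS with an explicit stack of frames instead of recursion.
--     Each frame is [remaining_callers, result]; the recursion's early
--     returns become direct returns out of the driver loop, and a child
--     frame finishing clean (result True) returns True overall, mirroring
--     the parent's short-circuit on a True inner result.
--     """
--     if current_method not in callsites:
--         return False
--     stack = [[list(callsites[current_method]), True]]
--     while True:
--         frame = stack[-1]
--         pushed = False
--         while frame[0]:
--             caller = frame[0].pop(0)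
--             if caller == target_method:
--                 frame[1] = False
--                 continue
--             if caller not in callsites:
--                 return True
--             if caller not in handled:
--                 handled.append(caller)
--                 stack.append([list(callsites[caller]), True])
--                 pushed = True
--                 break
--         if pushed:
--             continue
--         stack.pop()
--         if not stack:
--             return frame[1]
--         if frame[1]:
--             return True
--         stack[-1][1] = False
-- ===== Notes on version B (the rewrite author's own statement) =====
-- stated objective: alternative
-- what changed: Replaces A's recursion by an iterative DFS: a driver while-loop over an explicit stack of frames (remaining callers, local result), where the recursion's early returns become direct returns out of the loop and a popped frame that finished clean yields True overall.
import Mathlib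
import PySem

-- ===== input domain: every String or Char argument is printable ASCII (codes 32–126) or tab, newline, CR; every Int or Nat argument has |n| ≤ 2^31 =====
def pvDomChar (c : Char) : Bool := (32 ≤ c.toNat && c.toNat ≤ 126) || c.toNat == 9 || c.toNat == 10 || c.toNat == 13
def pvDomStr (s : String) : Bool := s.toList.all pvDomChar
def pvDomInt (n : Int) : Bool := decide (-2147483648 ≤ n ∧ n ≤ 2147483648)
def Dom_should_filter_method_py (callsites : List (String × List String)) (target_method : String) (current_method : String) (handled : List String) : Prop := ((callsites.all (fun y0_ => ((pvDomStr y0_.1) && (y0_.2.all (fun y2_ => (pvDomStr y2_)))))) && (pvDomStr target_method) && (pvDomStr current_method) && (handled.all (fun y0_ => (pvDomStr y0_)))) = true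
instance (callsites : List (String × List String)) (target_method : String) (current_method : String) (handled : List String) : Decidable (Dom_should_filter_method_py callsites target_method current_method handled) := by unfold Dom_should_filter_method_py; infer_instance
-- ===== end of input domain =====

-- B replaces A's recursion by an iterative DFS driving an explicit stack of frames
-- (objective: alternative decomposition). Both A and B append to `handled` in place in the
-- same order; the equivalence proved here is about the return value.

-- ===== PORT A =====
-- A's recursion mutates `handled`, so the port threads the handled list through and returns it
-- alongside the Bool. The recursion depth is bounded by the number of callsites keys not yet
-- handled (each nested call first appends a fresh key), so fuel = callsites.length + 1 is never
-- exhausted; the fuel-0 branch is an unreachable totality guard.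
mutual
def pvARec (fuel : Nat) (cs : List (String × List String)) (tgt : String) (cur : String) (h : List String) : Bool × List String :=
  match fuel with
  | 0 => (false, h)
  | fuel + 1 =>
    -- result = True; if current_method in callsites: … else: return False
    match (PySem.Dict.mk cs).get? cur with
    | none => (false, h)
    | some callers => pvALoop fuel cs tgt callers h true
  termination_by (fuel, 0)

def pvALoop (fuel : Nat) (cs : List (String × List String)) (tgt : String) (callers : List String) (h : List String) (res : Bool) : Bool × List String :=
  match callers with
  | [] => (res, h)
  | c :: rest =>
    if c == tgt then pvALoop fuel cs tgt rest h false               -- result = False; continue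
    else if ((PySem.Dict.mk cs).get? c).isNone then (true, h)       -- return True
    else if h.contains c then pvALoop fuel cs tgt rest h res        -- caller in handled: skip
    else if ((PySem.Dict.mk cs).get? c).isSome then                 -- A's redundant re-check
      let r := pvARec fuel cs tgt c (h ++ [c])                      -- handled.append; recurse
      if r.1 then (true, r.2)                                       -- inner_result → return True
      else pvALoop fuel cs tgt rest r.2 false                       -- result = False
    else pvALoop fuel cs tgt rest h res
  termination_by (fuel, callers.length + 1)
end

def should_filter_method_py (callsites : List (String × List String)) (target_method : String) (current_method : String) (handled : List String) : Bool :=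
  (pvARec (callsites.length + 1) callsites target_method current_method handled).1

-- ===== PORT B =====
-- B's frames are (fuel, remaining callers, result); the fuel component and pvBRun's global
-- fuel are totality guards for Lean (Python B's while-loop needs none); both are chosen so
-- they are never exhausted on any input, as the proofs below show.
inductive PvScanRes where
  | retTrue : PvScanRes                                                          -- `return True`
  | push : List String → Bool → List String → List String → PvScanRes            -- push a child frame
  | done : Bool → List String → PvScanRes                                        -- inner while ended
deriving Repr, DecidableEq

-- the inner `while frame[0]:` loop of B: scan the frame's remaining callers until a push,
-- an early `return True`, or exhaustion
def pvBScan (cs : List (String × List String)) (tgt : String) (f : Nat) : List String → List String → Bool → PvScanRes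
  | [], h, res => .done res h
  | c :: rest, h, res =>
    if c == tgt then pvBScan cs tgt f rest h false                              -- frame[1] = False
    else match (PySem.Dict.mk cs).get? c with
      | none => .retTrue                                                        -- return True
      | some cl =>
        if h.contains c then pvBScan cs tgt f rest h res
        else match f with
          | 0 => pvBScan cs tgt 0 rest (h ++ [c]) false                         -- fuel guard (unreachable)
          | _ + 1 => .push rest res cl (h ++ [c])                               -- handled.append; push

-- the outer driver loop of B: resume the top frame, push / pop / return
def pvBRun (cs : List (String × List String)) (tgt : String) : Nat → List (Nat × List String × Bool) → List String → Bool
  | 0, _, _ => false                                                            -- global fuel guard (unreachable)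
  | _ + 1, [], _ => false                                                       -- unreachable: loop exits by return
  | g + 1, (f, callers, res) :: below, h =>
    match pvBScan cs tgt f callers h res with
    | .retTrue => true                                                          -- return True
    | .push rest res' cl h' => pvBRun cs tgt g ((f - 1, cl, true) :: (f, rest, res') :: below) h'
    | .done r h' =>                                                             -- frame finished: pop
      match below with
      | [] => r                                                                 -- stack empty: return frame[1]
      | (pf, pcallers, _) :: rest2 =>
        if r then true                                                          -- clean child: return True
        else pvBRun cs tgt g ((pf, pcallers, false) :: rest2) h'                -- stack[-1][1] = False

def should_filter_method_py_alt (callsites : List (String × List String)) (target_method : String) (current_method : String) (handled : List String) : Bool :=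
  match (PySem.Dict.mk callsites).get? current_method with
  | none => false                                                               -- current_method not in callsites
  | some cl => pvBRun callsites target_method (2 * callsites.length + 1) [(callsites.length, cl, true)] handled

-- ===== PRECONDITION & SPEC =====
def Spec_should_filter_method_py (callsites : List (String × List String)) (target_method : String) (current_method : String) (handled : List String) (out : Bool) : Prop := out = should_filter_method_py_alt callsites target_method current_method handled
instance (callsites : List (String × List String)) (target_method : String) (current_method : String) (handled : List String) (out : Bool) : Decidable (Spec_should_filter_method_py callsites target_method current_method handled out) := by unfold Spec_should_filter_method_py; infer_instance

-- ===== CLAIM (what is proved, stated in full; the proofs are below) =====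
def Claim_equal_should_filter_method_py : Prop := ∀ (callsites : List (String × List String)) (target_method : String) (current_method : String) (handled : List String), Dom_should_filter_method_py callsites target_method current_method handled → Spec_should_filter_method_py callsites target_method current_method handled (should_filter_method_py callsites target_method current_method handled)

-- ===== LEMMAS AND PROOFS =====

-- potential: number of callsites-key occurrences not yet in handled; every push appends a
-- fresh key, so it strictly decreases, which bounds the number of driver-loop iterations
def pvPhi (cs : List (String × List String)) (h : List String) : Nat :=
  ((cs.map Prod.fst).filter (fun k => !h.contains k)).length

theorem pvFilter_append_le (l h : List String) (c : String) :
    (l.filter (fun k => !(h ++ [c]).contains k)).length ≤ (l.filter (fun k => !h.contains k)).length := by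
  induction l with
  | nil => simp
  | cons a t ih =>
    by_cases hb : a ∈ h
    · have e1 : (!(h ++ [c]).contains a) = false := by simp [hb]
      have e2 : (!h.contains a) = false := by simp [hb]
      rw [List.filter_cons, List.filter_cons, e1, e2]
      simpa using ih
    · by_cases he : a = c
      · have e1 : (!(h ++ [c]).contains a) = false := by simp [he]
        have e2 : (!h.contains a) = true := by simp [hb]
        rw [List.filter_cons, List.filter_cons, e1, e2]
        simp only [Bool.false_eq_true, if_false, if_true, List.length_cons]
        omega
      · have e1 : (!(h ++ [c]).contains a) = true := by simp [hb, he]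
        have e2 : (!h.contains a) = true := by simp [hb]
        rw [List.filter_cons, List.filter_cons, e1, e2]
        simp only [if_true, List.length_cons]
        omega

theorem pvFilter_append_lt (l h : List String) (c : String)
    (hmem : c ∈ l) (hc : c ∉ h) :
    (l.filter (fun k => !(h ++ [c]).contains k)).length < (l.filter (fun k => !h.contains k)).length := by
  induction l with
  | nil => simp at hmem
  | cons a t ih =>
    rcases List.mem_cons.mp hmem with rfl | hmemt
    · have e1 : (!(h ++ [c]).contains c) = false := by simp
      have e2 : (!h.contains c) = true := by simp [hc]
      rw [List.filter_cons, List.filter_cons, e1, e2]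
      simp only [Bool.false_eq_true, if_false, if_true, List.length_cons]
      have := pvFilter_append_le t h c
      omega
    · have ih' := ih hmemt
      by_cases hb : a ∈ h
      · have e1 : (!(h ++ [c]).contains a) = false := by simp [hb]
        have e2 : (!h.contains a) = false := by simp [hb]
        rw [List.filter_cons, List.filter_cons, e1, e2]
        simpa using ih'
      · by_cases he : a = c
        · have e1 : (!(h ++ [c]).contains a) = false := by simp [he]
          have e2 : (!h.contains a) = true := by simp [hb]
          rw [List.filter_cons, List.filter_cons, e1, e2]
          simp only [Bool.false_eq_true, if_false, if_true, List.length_cons]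
          omega
        · have e1 : (!(h ++ [c]).contains a) = true := by simp [hb, he]
          have e2 : (!h.contains a) = true := by simp [hb]
          rw [List.filter_cons, List.filter_cons, e1, e2]
          simp only [if_true, List.length_cons]
          omega

theorem pvPhi_append_le (cs : List (String × List String)) (h : List String) (c : String) :
    pvPhi cs (h ++ [c]) ≤ pvPhi cs h := pvFilter_append_le _ h c

theorem pvPhi_append_lt (cs : List (String × List String)) (h : List String) (c : String)
    (hmem : c ∈ cs.map Prod.fst) (hc : c ∉ h) :
    pvPhi cs (h ++ [c]) < pvPhi cs h := pvFilter_append_lt _ h c hmem hc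

theorem pvKey_of_get?_some (cs : List (String × List String)) (c : String) (cl : List String)
    (hget : (PySem.Dict.mk cs).get? c = some cl) : c ∈ cs.map Prod.fst := by
  by_contra hmem
  have h2 : (PySem.Dict.mk cs).get? c = none := by
    rw [PySem.Dict.get?_eq_none_iff_not_mem_keys]
    simpa [PySem.Dict.keys] using hmem
  rw [h2] at hget
  simp at hget

-- the inner scan is exactly one round of A's caller loop: it either early-returns True
-- (then A's loop value is true), finishes (then it IS A's loop result), or pushes a child
-- (then A's loop is the child recursion followed by the rest of the loop at result False)
theorem pvScan_spec (cs : List (String × List String)) (tgt : String) (f : Nat) :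
    ∀ (callers h : List String) (res : Bool),
      (pvBScan cs tgt f callers h res = .retTrue → (pvALoop f cs tgt callers h res).1 = true)
      ∧ (∀ r h', pvBScan cs tgt f callers h res = .done r h' →
          pvALoop f cs tgt callers h res = (r, h') ∧ pvPhi cs h' ≤ pvPhi cs h)
      ∧ (∀ rest res' cl h', pvBScan cs tgt f callers h res = .push rest res' cl h' →
          ∃ f', f = f' + 1 ∧ pvPhi cs h' < pvPhi cs h ∧
            pvALoop f cs tgt callers h res =
              (let r := pvALoop f' cs tgt cl h' true;
               if r.1 then (true, r.2) else pvALoop f cs tgt rest r.2 false)) := by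
  intro callers
  induction callers with
  | nil =>
    intro h res
    refine ⟨?_, ?_, ?_⟩
    · intro hcontra; simp [pvBScan] at hcontra
    · intro r h' hdone
      simp only [pvBScan] at hdone
      injection hdone with h1 h2
      subst h1; subst h2
      exact ⟨by simp [pvALoop], le_refl _⟩
    · intro rest res' cl h' hpush; simp [pvBScan] at hpush
  | cons c rest0 ih =>
    intro h res
    cases htgt : c == tgt with
    | true =>
      have hstep : pvBScan cs tgt f (c :: rest0) h res = pvBScan cs tgt f rest0 h false := by
        simp only [pvBScan]; simp [htgt]
      have haloop : pvALoop f cs tgt (c :: rest0) h res = pvALoop f cs tgt rest0 h false := by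
        simp only [pvALoop]; simp [htgt]
      rw [hstep, haloop]; exact ih h false
    | false =>
      cases hget : (PySem.Dict.mk cs).get? c with
      | none =>
        have hstep : pvBScan cs tgt f (c :: rest0) h res = .retTrue := by
          simp only [pvBScan]; simp [htgt, hget]
        have haloop : pvALoop f cs tgt (c :: rest0) h res = (true, h) := by
          simp only [pvALoop]; simp [htgt, hget]
        refine ⟨fun _ => by simp [haloop], ?_, ?_⟩
        · intro r h' hdone; rw [hstep] at hdone; exact absurd hdone (by simp)
        · intro rest res' cl h' hpush; rw [hstep] at hpush; exact absurd hpush (by simp)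
      | some cl0 =>
        by_cases hmem : c ∈ h
        · have hstep : pvBScan cs tgt f (c :: rest0) h res = pvBScan cs tgt f rest0 h res := by
            simp only [pvBScan]; simp [htgt, hget, hmem]
          have haloop : pvALoop f cs tgt (c :: rest0) h res = pvALoop f cs tgt rest0 h res := by
            simp only [pvALoop]; simp [htgt, hget, hmem]
          rw [hstep, haloop]; exact ih h res
        · cases f with
          | zero =>
            have hstep : pvBScan cs tgt 0 (c :: rest0) h res = pvBScan cs tgt 0 rest0 (h ++ [c]) false := by
              simp only [pvBScan]; simp [htgt, hget, hmem]
            have haloop : pvALoop 0 cs tgt (c :: rest0) h res = pvALoop 0 cs tgt rest0 (h ++ [c]) false := by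
              simp only [pvALoop]; simp [htgt, hget, hmem, pvARec]
            rw [hstep, haloop]
            obtain ⟨c1, c2, c3⟩ := ih (h ++ [c]) false
            refine ⟨c1, ?_, ?_⟩
            · intro r h' hdone
              obtain ⟨he, hle⟩ := c2 r h' hdone
              exact ⟨he, le_trans hle (pvPhi_append_le cs h c)⟩
            · intro rest res' clx h' hpush
              obtain ⟨f', hf, hlt, he⟩ := c3 rest res' clx h' hpush
              exact ⟨f', hf, lt_of_lt_of_le hlt (pvPhi_append_le cs h c), he⟩
          | succ f' =>
            have hstep : pvBScan cs tgt (f' + 1) (c :: rest0) h res = .push rest0 res cl0 (h ++ [c]) := by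
              simp only [pvBScan]; simp [htgt, hget, hmem]
            refine ⟨?_, ?_, ?_⟩
            · intro hcontra; rw [hstep] at hcontra; exact absurd hcontra (by simp)
            · intro r h' hdone; rw [hstep] at hdone; exact absurd hdone (by simp)
            · intro rest res' clx h' hpush
              rw [hstep] at hpush
              injection hpush with h1 h2 h3 h4
              subst h1; subst h2; subst h3; subst h4
              refine ⟨f', rfl, pvPhi_append_lt cs h c (pvKey_of_get?_some cs c cl0 hget) hmem, ?_⟩
              simp only [pvALoop]
              simp [htgt, hget, hmem, pvARec]

-- what popping the rest of the stack computes, expressed with A's loop: propagate a true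
-- frame value, otherwise resume the parent frame at result False
def pvFold (cs : List (String × List String)) (tgt : String) : List (Nat × List String × Bool) → Bool × List String → Bool
  | [], r => r.1
  | (pf, pcallers, _) :: rest2, r =>
    if r.1 then true else pvFold cs tgt rest2 (pvALoop pf cs tgt pcallers r.2 false)

theorem pvFold_fst_true (cs : List (String × List String)) (tgt : String)
    (below : List (Nat × List String × Bool)) (r : Bool × List String) (hr : r.1 = true) :
    pvFold cs tgt below r = true := by
  cases below with
  | nil => simpa [pvFold] using hr
  | cons p rest2 => obtain ⟨pf, pcallers, pres⟩ := p; simp [pvFold, hr]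

theorem pvRun_spec (cs : List (String × List String)) (tgt : String) :
    ∀ (g : Nat) (f : Nat) (callers : List String) (res : Bool)
      (below : List (Nat × List String × Bool)) (h : List String),
      2 * pvPhi cs h + (below.length + 1) ≤ g →
      pvBRun cs tgt g ((f, callers, res) :: below) h
        = pvFold cs tgt below (pvALoop f cs tgt callers h res) := by
  intro g
  induction g with
  | zero => intro f callers res below h hb; omega
  | succ g ih =>
    intro f callers res below h hb
    obtain ⟨sTrue, sDone, sPush⟩ := pvScan_spec cs tgt f callers h res
    rw [pvBRun]
    cases hscan : pvBScan cs tgt f callers h res with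
    | retTrue => exact (pvFold_fst_true cs tgt below _ (sTrue hscan)).symm
    | done r h' =>
      obtain ⟨he, hle⟩ := sDone r h' hscan
      rw [he]
      cases below with
      | nil => simp [pvFold]
      | cons p rest2 =>
        obtain ⟨pf, pcallers, pres⟩ := p
        cases r with
        | true => simp [pvFold]
        | false =>
          simp only [pvFold, Bool.false_eq_true, if_false]
          exact ih pf pcallers false rest2 h' (by simp only [List.length_cons] at hb ⊢; omega)
    | push rest res' cl h' =>
      obtain ⟨f', hf, hlt, he⟩ := sPush rest res' cl h' hscan
      subst hf
      have hstep := ih f' cl true ((f' + 1, rest, res') :: below) h'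
        (by simp only [List.length_cons] at hb ⊢; omega)
      simp only [Nat.add_sub_cancel]
      rw [hstep, he]
      cases hr1 : (pvALoop f' cs tgt cl h' true).1 with
      | true =>
        rw [pvFold_fst_true cs tgt ((f' + 1, rest, res') :: below) _ hr1]
        simp only [hr1, if_true]
        exact (pvFold_fst_true cs tgt below _ rfl).symm
      | false =>
        simp only [pvFold, hr1, Bool.false_eq_true, if_false]

theorem pvPhi_le_len (cs : List (String × List String)) (h : List String) :
    pvPhi cs h ≤ cs.length := by
  unfold pvPhi
  calc ((cs.map Prod.fst).filter _).length ≤ (cs.map Prod.fst).length := List.length_filter_le _ _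
    _ = cs.length := by simp

-- ===== VERDICT (by name: the statement is the Claim_ definition above) =====
theorem should_filter_method_py_spec : Claim_equal_should_filter_method_py := by
  intro cs tgt cur h _dom
  unfold Spec_should_filter_method_py should_filter_method_py should_filter_method_py_alt
  rw [pvARec]
  cases hget : (PySem.Dict.mk cs).get? cur with
  | none => rfl
  | some cl =>
    have hb : 2 * pvPhi cs h + (([] : List (Nat × List String × Bool)).length + 1) ≤ 2 * cs.length + 1 := by
      have := pvPhi_le_len cs h; simp; omega
    show (pvALoop cs.length cs tgt cl h true).1
        = pvBRun cs tgt (2 * cs.length + 1) [(cs.length, cl, true)] h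
    rw [pvRun_spec cs tgt (2 * cs.length + 1) cs.length cl true [] h hb]
    simp [pvFold]
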